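-- pv_equiv track=rewrite | github.com/Crazyfier/PyTutor-Helper | Main menu.py | input_val
-- ===== SOURCE A (Python) =====
-- def input_val(input, IfWord, IfNum):
--     while input[0] == " ":
--         input = input.replace(" ", "", 1)
--
--     while input.count("  ") > 0:
--         input = input.replace("  ", " ")
--
--     tempvar = input.replace(" ", "")
--     return (tempvar.isalpha() == IfWord or tempvar.isspace() or tempvar.isnumeric() == IfNum)\
--         , input
-- ===== SOURCE B (Python) =====
-- def input_val(input, IfWord, IfNum):
--     s = input.lstrip(" ")
--     # collapse runs of spaces in a single scan
--     out = []
--     prev_space = False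
--     for c in s:
--         if c == " ":
--             if not prev_space:
--                 out.append(c)
--             prev_space = True
--         else:
--             out.append(c)
--             prev_space = False
--     s = "".join(out)
--     tempvar = "".join(c for c in s if c != " ")
--     return (tempvar.isalpha() == IfWord or tempvar.isspace() or tempvar.isnumeric() == IfNum), s
-- ===== Notes on version B (the rewrite author's own statement) =====
-- stated objective: alternative
-- what changed: A's repeated fixpoint passes of replace(' ',' ') (and one-at-a-time leading replace(' ','',1)) are replaced by lstrip plus a single scan that skips a space whenever the previously emitted character was a space.
import Mathlib
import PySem

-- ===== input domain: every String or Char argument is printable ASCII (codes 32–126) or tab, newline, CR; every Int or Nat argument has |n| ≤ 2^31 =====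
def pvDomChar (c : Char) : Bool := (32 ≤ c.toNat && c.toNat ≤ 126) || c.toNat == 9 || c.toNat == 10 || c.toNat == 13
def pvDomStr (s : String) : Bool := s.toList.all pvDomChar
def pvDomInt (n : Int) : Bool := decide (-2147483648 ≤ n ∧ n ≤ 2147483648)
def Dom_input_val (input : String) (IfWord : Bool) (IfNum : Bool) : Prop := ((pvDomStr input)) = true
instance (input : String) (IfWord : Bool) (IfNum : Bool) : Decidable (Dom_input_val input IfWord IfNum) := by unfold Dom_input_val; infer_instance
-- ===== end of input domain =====

-- ===== PORT A =====
-- B: a single scan with a previous-was-space flag collapses space runs, instead of A's fixpoint of repeated replace("  "," ") passes.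

-- input.replace(" ", "", 1) : removes the first occurrence of ' ' (exact for the 1-char pattern)
def pvRemoveFirstSpace : List Char → List Char
  | [] => []
  | c :: rest => if c = ' ' then rest else c :: pvRemoveFirstSpace rest

-- while input[0] == " ": input = input.replace(" ", "", 1)   (none = IndexError on the empty string)
def pvStripLoop : List Char → Option (List Char)
  | [] => none
  | c :: rest =>
    if h : c = ' ' then pvStripLoop (pvRemoveFirstSpace (c :: rest)) else some (c :: rest)
  termination_by l => l.length
  decreasing_by simp [pvRemoveFirstSpace, h]

-- input.count("  ") : Python's non-overlapping left-to-right count of "  "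
def pvCountDbl : List Char → Nat
  | ' ' :: ' ' :: rest => 1 + pvCountDbl rest
  | _ :: rest => pvCountDbl rest
  | [] => 0

-- input.replace("  ", " ") : Python's non-overlapping left-to-right replacement of "  " by " "
def pvReplaceDbl : List Char → List Char
  | ' ' :: ' ' :: rest => ' ' :: pvReplaceDbl rest
  | c :: rest => c :: pvReplaceDbl rest
  | [] => []

-- termination measure for the collapse loop (cited by name in decreasing_by)
theorem pvReplaceDbl_length (l : List Char) :
    (pvReplaceDbl l).length + pvCountDbl l = l.length := by
  induction l using pvReplaceDbl.induct with
  | case1 rest ih => simp [pvReplaceDbl, pvCountDbl]; omega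
  | case2 c rest h ih =>
    match c, rest, h with
    | c, rest, h =>
      rw [pvReplaceDbl.eq_def, pvCountDbl.eq_def]
      cases c <;> cases rest <;> simp_all <;> omega
  | case3 => simp [pvReplaceDbl, pvCountDbl]

-- while input.count("  ") > 0: input = input.replace("  ", " ")
def pvCollapseLoop (l : List Char) : List Char :=
  if pvCountDbl l > 0 then pvCollapseLoop (pvReplaceDbl l) else l
  termination_by l.length
  decreasing_by have := pvReplaceDbl_length l; omega

-- input.replace(" ", "")
def pvRemoveSpaces : List Char → List Char
  | [] => []
  | c :: rest => if c = ' ' then pvRemoveSpaces rest else c :: pvRemoveSpaces rest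

-- tempvar.isnumeric() is ported as strIsdigit: on the printable-ASCII domain the two agree
def input_val (input : String) (IfWord : Bool) (IfNum : Bool) : Bool × String :=
  match pvStripLoop input.toList with
  | none => (false, "")   -- IndexError: excluded by Pre_input_val
  | some l0 =>
    let l := pvCollapseLoop l0
    let tempvar := pvRemoveSpaces l
    ((PySem.Chars.strIsalpha tempvar == IfWord) || PySem.Chars.strIsspace tempvar
       || (PySem.Chars.strIsdigit tempvar == IfNum), String.mk l)

-- ===== PORT B =====
-- the for-loop over s with the prev_space flag, appending into out
def pvSqueeze : List Char → Bool → List Char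
  | [], _ => []
  | c :: rest, prev =>
    if c = ' ' then
      if prev then pvSqueeze rest true else ' ' :: pvSqueeze rest true
    else c :: pvSqueeze rest false

def input_val_alt (input : String) (IfWord : Bool) (IfNum : Bool) : Bool × String :=
  let s0 := input.toList.dropWhile (· = ' ')       -- input.lstrip(" ")
  let s := pvSqueeze s0 false
  let tempvar := s.filter (fun c => c ≠ ' ')       -- "".join(c for c in s if c != " ")
  ((PySem.Chars.strIsalpha tempvar == IfWord) || PySem.Chars.strIsspace tempvar
     || (PySem.Chars.strIsdigit tempvar == IfNum), String.mk s)

-- ===== PRECONDITION & SPEC =====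
-- Pre_ excludes exactly the inputs (empty or all-space strings) on which A's leading-strip loop
-- raises IndexError after exhausting the string.
def Pre_input_val (input : String) (IfWord : Bool) (IfNum : Bool) : Prop :=
  input.toList.any (fun c => c ≠ ' ') = true
instance (input : String) (IfWord : Bool) (IfNum : Bool) : Decidable (Pre_input_val input IfWord IfNum) := by
  unfold Pre_input_val; infer_instance

def pvWitness_input_val : String × Bool × Bool := (" ab 12 ", true, false)

def Spec_input_val (input : String) (IfWord : Bool) (IfNum : Bool) (out : Bool × String) : Prop := out = input_val_alt input IfWord IfNum
instance (input : String) (IfWord : Bool) (IfNum : Bool) (out : Bool × String) : Decidable (Spec_input_val input IfWord IfNum out) := by unfold Spec_input_val; infer_instance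

-- ===== CLAIM (what is proved, stated in full; the proofs are below) =====
def Claim_equal_input_val : Prop := ∀ (input : String) (IfWord : Bool) (IfNum : Bool), Dom_input_val input IfWord IfNum → Pre_input_val input IfWord IfNum → Spec_input_val input IfWord IfNum (input_val input IfWord IfNum)

-- ===== LEMMAS AND PROOFS =====

theorem pvReplaceDbl_cons (head : Char) (rest : List Char)
    (hno : ∀ (r : List Char), head = ' ' → rest = ' ' :: r → False) :
    pvReplaceDbl (head :: rest) = head :: pvReplaceDbl rest := by
  rw [pvReplaceDbl.eq_def]
  split <;> simp_all

theorem pvCountDbl_cons (head : Char) (rest : List Char)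
    (hno : ∀ (r : List Char), head = ' ' → rest = ' ' :: r → False) :
    pvCountDbl (head :: rest) = pvCountDbl rest := by
  rw [pvCountDbl.eq_def]
  split <;> simp_all

theorem pvStripLoop_eq_dropWhile (l : List Char) :
    (∃ c ∈ l, c ≠ ' ') → pvStripLoop l = some (l.dropWhile (· = ' ')) := by
  induction l using pvStripLoop.induct with
  | case1 => intro h; simp at h
  | case2 rest ih =>
    intro h
    have hrest : ∃ c ∈ rest, c ≠ ' ' := by
      rcases h with ⟨d, hd, hne⟩
      rcases List.mem_cons.mp hd with hd | hd
      · exact absurd hd hne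
      · exact ⟨d, hd, hne⟩
    have hrm : pvRemoveFirstSpace (' ' :: rest) = rest := by simp [pvRemoveFirstSpace]
    rw [pvStripLoop]
    simp only [hrm]
    rw [hrm] at ih
    rw [ih hrest, List.dropWhile]
    simp
  | case3 c rest hc =>
    intro _
    rw [pvStripLoop]
    simp [hc, List.dropWhile]

theorem pvSqueeze_replaceDbl (l : List Char) : ∀ b, pvSqueeze (pvReplaceDbl l) b = pvSqueeze l b := by
  induction l using pvReplaceDbl.induct with
  | case1 rest ih =>
    intro b
    cases b <;> simp [pvReplaceDbl, pvSqueeze, ih]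
  | case2 head rest hno ih =>
    intro b
    rw [pvReplaceDbl_cons head rest hno]
    by_cases hh : head = ' ' <;> cases b <;> simp [pvSqueeze, hh, ih]
  | case3 => intro b; simp [pvReplaceDbl]

theorem pvSqueeze_fixed (l : List Char) : pvCountDbl l = 0 →
    pvSqueeze l false = l ∧ (l.head? ≠ some ' ' → pvSqueeze l true = l) := by
  induction l using pvCountDbl.induct with
  | case1 rest ih => intro h; simp [pvCountDbl] at h
  | case2 head rest hno ih =>
    intro h
    rw [pvCountDbl_cons head rest hno] at h
    rcases ih h with ⟨ih1, ih2⟩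
    by_cases hh : head = ' '
    · have hhd : rest.head? ≠ some ' ' := by
        cases rest with
        | nil => simp
        | cons c2 r =>
          intro hcon
          simp at hcon
          exact hno r hh (by rw [hcon])
      subst hh
      constructor
      · simp [pvSqueeze, ih2 hhd]
      · intro hx; simp at hx
    · constructor
      · simp [pvSqueeze, hh, ih1]
      · intro _; simp [pvSqueeze, hh, ih1]
  | case3 => intro _; simp [pvSqueeze]

theorem pvCollapseLoop_eq_squeeze (l : List Char) : pvCollapseLoop l = pvSqueeze l false := by
  induction l using pvCollapseLoop.induct with
  | case1 l hgt ih =>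
    rw [pvCollapseLoop, if_pos hgt, ih, pvSqueeze_replaceDbl]
  | case2 l hng =>
    rw [pvCollapseLoop, if_neg hng]
    exact ((pvSqueeze_fixed l (by omega)).1).symm

theorem pvRemoveSpaces_eq_filter (l : List Char) : pvRemoveSpaces l = l.filter (fun c => c ≠ ' ') := by
  induction l with
  | nil => simp [pvRemoveSpaces]
  | cons c rest ih => by_cases h : c = ' ' <;> simp [pvRemoveSpaces, h, ih]

-- ===== VERDICT (by name: the statement is the Claim_ definition above) =====
theorem input_val_spec : Claim_equal_input_val := by
  intro input IfWord IfNum _ hpre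
  unfold Spec_input_val input_val input_val_alt
  have hex : ∃ c ∈ input.toList, c ≠ ' ' := by
    simpa [Pre_input_val, List.any_eq_true] using hpre
  rw [pvStripLoop_eq_dropWhile input.toList hex]
  simp only [pvCollapseLoop_eq_squeeze, pvRemoveSpaces_eq_filter]
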